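-- pv_equiv track=rewrite | github.com/amitd8/RaPidAnalytics | RaPidAnalytics.py | DetectLOLBAS
-- ===== SOURCE A (Python) =====
-- def printhierarchyhelper(pid,PIDsDict):
--     if pid in PIDsDict:
--         PIDname = PIDsDict[pid][1]
--         PPID = PIDsDict[pid][0]
--         return str(printhierarchy(PPID,PIDsDict)) + " --> " + PIDname+"("+pid+")"
--
-- def printhierarchy(pid,PIDsDict):
--         return str(printhierarchyhelper(pid,PIDsDict)).replace("None --> ","")
--
-- def count_occurrences(PIDsDict, pname):
--     pids = []
--     for pid, ppidname in PIDsDict.items():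
--         if ppidname[1] == pname:
--             pids.append(pid)
--     return len(pids), pids
--
-- def DetectLOLBAS(PIDsDict):
--     analysis = ""
--     proc = ["powershell.exe","wscript.exe","cscript.exe","mshta.exe","wmic.exe"]
--     for process in proc:
--         c,pids = count_occurrences(PIDsDict,process)
--         for dis in pids:
--             h = (printhierarchy(dis,PIDsDict))
--             analysis += "   "+h+"\n"+"   (Medium) "+process+"("+dis+") is often used by attackers " "\n"+"\n"
--     if analysis.strip():
--         lines = analysis.split('\n')
--         lines.insert(0, "- Suspicious LOLBAS detections (T1059):")
--         return '\n'.join(lines)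
--     else:
--         return analysis
-- ===== SOURCE B (Python) =====
-- def printhierarchyhelper(pid,PIDsDict):
--     if pid in PIDsDict:
--         PIDname = PIDsDict[pid][1]
--         PPID = PIDsDict[pid][0]
--         return str(printhierarchy(PPID,PIDsDict)) + " --> " + PIDname+"("+pid+")"
--
-- def printhierarchy(pid,PIDsDict):
--         return str(printhierarchyhelper(pid,PIDsDict)).replace("None --> ","")
--
-- def DetectLOLBAS(PIDsDict):
--     proc = ["powershell.exe","wscript.exe","cscript.exe","mshta.exe","wmic.exe"]
--     byname = {}
--     for pid, ppidname in PIDsDict.items():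
--         byname.setdefault(ppidname[1], []).append(pid)
--     parts = []
--     for process in proc:
--         for pid in byname.get(process, []):
--             parts.append("   " + printhierarchy(pid, PIDsDict)
--                          + "\n   (Medium) " + process + "(" + pid
--                          + ") is often used by attackers \n\n")
--     if not parts:
--         return ""
--     return "- Suspicious LOLBAS detections (T1059):\n" + "".join(parts)
-- ===== Notes on version B (the rewrite author's own statement) =====
-- stated objective: alternative
-- what changed: B groups all pids by process name in a single pass over the dict and then looks each watched name up in that index, instead of A's full rescan of the dict per watched name, and it assembles the report directly as header + joined entry list instead of A's split/insert/join round trip.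
import Mathlib
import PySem

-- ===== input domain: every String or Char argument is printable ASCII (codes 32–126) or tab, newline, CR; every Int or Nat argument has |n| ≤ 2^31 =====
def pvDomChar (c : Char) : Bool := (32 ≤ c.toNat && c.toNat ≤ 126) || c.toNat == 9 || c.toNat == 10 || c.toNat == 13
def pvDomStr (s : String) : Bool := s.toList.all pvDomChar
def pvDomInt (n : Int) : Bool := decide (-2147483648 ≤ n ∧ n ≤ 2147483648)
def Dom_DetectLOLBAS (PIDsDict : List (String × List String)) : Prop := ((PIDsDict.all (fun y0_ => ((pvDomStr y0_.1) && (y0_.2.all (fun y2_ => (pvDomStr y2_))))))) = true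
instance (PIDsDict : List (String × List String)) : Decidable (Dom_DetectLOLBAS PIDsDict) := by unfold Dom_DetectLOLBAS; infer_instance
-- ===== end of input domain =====

-- B builds a name→pids index in one pass and emits the report directly (header ++ joined
-- entries) instead of A's per-name rescans and split/insert/join round trip.

-- ===== PORT A =====
-- shared hierarchy helpers: printhierarchy/printhierarchyhelper are byte-identical in Source A and
-- Source B, so both ports call this one transliteration.  Python's unbounded mutual recursion is
-- ported with fuel = |dict| + 1; Pre_ guarantees every parent chain that is actually walked
-- leaves the dict within that many lookups, so the fuel-0 branch is unreachable under Pre_.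
def pvHier : Nat → String → PySem.Dict String (List String) → String
  | 0, _, _ => "None"
  | fuel+1, pid, d =>
      let pre : String :=
        match PySem.Dict.get? d pid with
        | none => "None"      -- printhierarchyhelper returns None; str(None) = "None"
        | some v =>
            pvHier fuel ((PySem.List.pyGet? v 0).getD "") d ++ " --> " ++
              (PySem.List.pyGet? v 1).getD "" ++ "(" ++ pid ++ ")"
      PySem.Str.replace pre "None --> " ""

def count_occurrences (d : PySem.Dict String (List String)) (pname : String) :
    Int × List String :=
  let pids := d.items.foldl
    (fun pids kv => if (PySem.List.pyGet? kv.2 1).getD "" == pname then pids ++ [kv.1] else pids)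
    []
  ((pids.length : Int), pids)

def DetectLOLBAS (PIDsDict : List (String × List String)) : String :=
  let dd := PySem.Dict.ofList PIDsDict
  let fuel := PIDsDict.length + 1
  let proc := ["powershell.exe", "wscript.exe", "cscript.exe", "mshta.exe", "wmic.exe"]
  let analysis := proc.foldl
    (fun analysis process =>
      let pids := (count_occurrences dd process).2
      pids.foldl
        (fun analysis dis =>
          analysis ++ ("   " ++ pvHier fuel dis dd ++ "\n" ++ "   (Medium) " ++ process ++
            "(" ++ dis ++ ") is often used by attackers \n" ++ "\n"))
        analysis)
    ""
  if PySem.Str.strip analysis ≠ "" then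
    let lines := (PySem.Str.split? analysis "\n").getD []
    PySem.Str.join "\n" ("- Suspicious LOLBAS detections (T1059):" :: lines)
  else analysis

-- ===== PORT B =====
def DetectLOLBAS_alt (PIDsDict : List (String × List String)) : String :=
  let dd := PySem.Dict.ofList PIDsDict
  let fuel := PIDsDict.length + 1
  let proc := ["powershell.exe", "wscript.exe", "cscript.exe", "mshta.exe", "wmic.exe"]
  let byname : PySem.Dict String (List String) := dd.items.foldl
    (fun byname kv =>
      let name := (PySem.List.pyGet? kv.2 1).getD ""
      byname.insert name (byname.getD name [] ++ [kv.1]))   -- setdefault(...,[]).append(pid)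
    PySem.Dict.empty
  let parts : List String := proc.foldl
    (fun parts process =>
      (byname.getD process []).foldl
        (fun parts pid =>
          parts ++ ["   " ++ pvHier fuel pid dd ++ "\n   (Medium) " ++ process ++ "(" ++ pid ++
            ") is often used by attackers \n\n"])
        parts)
    []
  if parts = [] then ""
  else "- Suspicious LOLBAS detections (T1059):\n" ++ PySem.Str.join "" parts

-- ===== PRECONDITION & SPEC =====
-- pvEscapes n pid d: the parent chain from pid leaves the dict within n lookups.  This is a
-- property of the input's parent GRAPH (acyclicity below pid), not a re-run of either port:
-- it builds no strings and neither port mentions it; |dict|+1 lookups suffice for any chain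
-- that leaves the dict at all, so 'pvEscapes (|dict|+1)' says exactly 'this chain is finite'.
def pvEscapes : Nat → String → PySem.Dict String (List String) → Bool
  | 0, _, _ => false
  | n+1, pid, d =>
      match PySem.Dict.get? d pid with
      | none => true
      | some v => pvEscapes n ((PySem.List.pyGet? v 0).getD "") d

-- Pre_ = exactly the inputs on which the Python A returns: every dict value must have at least
-- two elements (count_occurrences does ppidname[1], printhierarchyhelper does [1]/[0]; shorter
-- values raise IndexError), and the parent chain of every pid whose name is watched must leave
-- the dict (a reachable cycle makes printhierarchy recurse forever: RecursionError).
def Pre_DetectLOLBAS (PIDsDict : List (String × List String)) : Prop :=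
  (∀ kv ∈ (PySem.Dict.ofList PIDsDict).items, 2 ≤ kv.2.length) ∧
  (∀ kv ∈ (PySem.Dict.ofList PIDsDict).items,
    (PySem.List.pyGet? kv.2 1).getD "" ∈
      ["powershell.exe", "wscript.exe", "cscript.exe", "mshta.exe", "wmic.exe"] →
    pvEscapes (PIDsDict.length + 1) kv.1 (PySem.Dict.ofList PIDsDict) = true)
instance (PIDsDict : List (String × List String)) : Decidable (Pre_DetectLOLBAS PIDsDict) := by
  unfold Pre_DetectLOLBAS; infer_instance

def pvWitness_DetectLOLBAS : (List (String × List String)) :=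
  [("7", ["1", "powershell.exe"]), ("8", ["7", "wmic.exe"]), ("9", ["9", "calc.exe"])]

def Spec_DetectLOLBAS (PIDsDict : List (String × List String)) (out : String) : Prop :=
  out = DetectLOLBAS_alt PIDsDict
instance (PIDsDict : List (String × List String)) (out : String) :
    Decidable (Spec_DetectLOLBAS PIDsDict out) := by unfold Spec_DetectLOLBAS; infer_instance

-- ===== CLAIM (what is proved, stated in full; the proofs are below) =====
def Claim_equal_DetectLOLBAS : Prop := ∀ (PIDsDict : List (String × List String)),
  Dom_DetectLOLBAS PIDsDict → Pre_DetectLOLBAS PIDsDict →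
  Spec_DetectLOLBAS PIDsDict (DetectLOLBAS PIDsDict)

-- ===== LEMMAS AND PROOFS =====

-- the per-detection entry string: A's and B's literal pieces concatenate to the same string
theorem pv_entry_eq (h p pid : String) :
    "   " ++ h ++ "\n" ++ "   (Medium) " ++ p ++ "(" ++ pid ++ ") is often used by attackers \n" ++ "\n"
      = "   " ++ h ++ "\n   (Medium) " ++ p ++ "(" ++ pid ++ ") is often used by attackers \n\n" := by
  simp [String.append_assoc]

-- A's count_occurrences fold is append of a filter-map
theorem pv_pids_fold (p : String) :
    ∀ (l : List (String × List String)) (acc : List String),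
      l.foldl (fun pids kv =>
          if (PySem.List.pyGet? kv.2 1).getD "" == p then pids ++ [kv.1] else pids) acc
        = acc ++ (l.filter (fun kv => (PySem.List.pyGet? kv.2 1).getD "" == p)).map Prod.fst := by
  intro l
  induction l with
  | nil => simp
  | cons kv t ih =>
    intro acc
    rw [List.foldl_cons]
    by_cases hk : ((PySem.List.pyGet? kv.2 1).getD "" == p) = true
    · rw [if_pos hk, ih, List.filter_cons, if_pos hk]
      simp
    · rw [if_neg hk, ih, List.filter_cons, if_neg hk]


-- B's one-pass grouping read back at p is the same filter-map
theorem pv_group_fold (p : String) :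
    ∀ (l : List (String × List String)) (b : PySem.Dict String (List String)),
      (l.foldl (fun byname kv =>
          byname.insert ((PySem.List.pyGet? kv.2 1).getD "")
            (byname.getD ((PySem.List.pyGet? kv.2 1).getD "") [] ++ [kv.1])) b).getD p []
        = b.getD p [] ++ (l.filter (fun kv => (PySem.List.pyGet? kv.2 1).getD "" == p)).map Prod.fst := by
  intro l
  induction l with
  | nil => simp
  | cons kv t ih =>
    intro b
    rw [List.foldl_cons, ih, PySem.Dict.getD_insert]
    by_cases hk : p = (PySem.List.pyGet? kv.2 1).getD ""
    · simp [hk]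
    · have : ((PySem.List.pyGet? kv.2 1).getD "" == p) = false := by
        simp [beq_iff_eq]; exact fun h => hk h.symm
      simp [hk, List.filter_cons, this]

theorem pv_intercalate_nil (l : List (List Char)) : List.intercalate [] l = l.flatten := by
  induction l with
  | nil => rfl
  | cons a t ih => cases t <;> simp_all [List.intercalate, List.intersperse]

theorem pv_join_snoc (ps : List String) (e : String) :
    PySem.Str.join "" (ps ++ [e]) = PySem.Str.join "" ps ++ e := by
  simp [PySem.Str.join, PySem.Chars.join, pv_intercalate_nil]

-- accumulating entries into a string = joining the accumulated entry list
theorem pv_inner_fold (f : String → String) :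
    ∀ (pids : List String) (ps : List String),
      pids.foldl (fun s pid => s ++ f pid) (PySem.Str.join "" ps)
        = PySem.Str.join "" (pids.foldl (fun ps pid => ps ++ [f pid]) ps) := by
  intro pids
  induction pids with
  | nil => simp
  | cons pid t ih =>
    intro ps
    rw [List.foldl_cons, List.foldl_cons, ← pv_join_snoc, ih]

theorem pv_outer_fold (ent : String → String → String) (pidsOf : String → List String) :
    ∀ (procs : List String) (ps : List String),
      procs.foldl (fun s p => (pidsOf p).foldl (fun s pid => s ++ ent p pid) s)
          (PySem.Str.join "" ps)
        = PySem.Str.join ""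
            (procs.foldl (fun ps p => (pidsOf p).foldl (fun ps pid => ps ++ [ent p pid]) ps) ps) := by
  intro procs
  induction procs with
  | nil => intro ps; simp
  | cons p t ih =>
    intro ps
    rw [List.foldl_cons, List.foldl_cons, pv_inner_fold (ent p), ih]

-- every accumulated entry contains the letter 'M' (from "(Medium)")
theorem pv_parts_mem (ent : String → String → String)
    (hent : ∀ p pid, 'M' ∈ (ent p pid).toList) (pidsOf : String → List String) :
    ∀ (procs : List String) (ps : List String), (∀ x ∈ ps, 'M' ∈ x.toList) →
      ∀ x ∈ procs.foldl
          (fun ps p => (pidsOf p).foldl (fun ps pid => ps ++ [ent p pid]) ps) ps,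
        'M' ∈ x.toList := by
  have inner : ∀ (p : String) (pids : List String) (ps : List String),
      (∀ x ∈ ps, 'M' ∈ x.toList) →
      ∀ x ∈ pids.foldl (fun ps pid => ps ++ [ent p pid]) ps, 'M' ∈ x.toList := by
    intro p pids
    induction pids with
    | nil => intro ps h x hx; exact h x hx
    | cons pid t ih =>
      intro ps h x hx
      refine ih _ (fun y hy => ?_) x hx
      rcases List.mem_append.mp hy with hy | hy
      · exact h y hy
      · simp at hy; subst hy; exact hent p pid
  intro procs
  induction procs with
  | nil => intro ps h x hx; exact h x hx
  | cons p t ih =>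
    intro ps h x hx
    exact ih _ (inner p _ _ h) x hx

theorem pv_strip_ne (s : String) (h : 'M' ∈ s.toList) : PySem.Str.strip s ≠ "" := by
  intro he
  have h1 : PySem.Chars.strip s.toList = [] := by
    have := congrArg String.toList he
    rw [PySem.Str.toList_strip] at this
    simpa using this
  unfold PySem.Chars.strip PySem.Chars.rstrip PySem.Chars.lstrip at h1
  have h2 : List.dropWhile PySem.Chars.isspace
      (List.dropWhile PySem.Chars.isspace s.toList).reverse = [] := by
    simpa using h1
  have h4 : 'M' ∈ List.dropWhile PySem.Chars.isspace s.toList := by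
    have hs := List.takeWhile_append_dropWhile (p := PySem.Chars.isspace) (l := s.toList)
    rw [← hs] at h
    rcases List.mem_append.mp h with h5 | h5
    · exact absurd (List.mem_takeWhile_imp h5) (by decide)
    · exact h5
  have := List.dropWhile_eq_nil_iff.mp h2 'M' (by simpa using h4)
  exact absurd this (by decide)

theorem pv_intercalate_snoc (sep : List Char) (l : List (List Char)) (x : List Char) :
    List.intercalate sep (l ++ [x])
      = (if l = [] then [] else List.intercalate sep l ++ sep) ++ x := by
  induction l with
  | nil => simp [List.intercalate]
  | cons a t ih =>
    cases t with
    | nil => simp [List.intercalate, List.intersperse]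
    | cons b u => simp_all [List.intercalate, List.intersperse]

theorem pv_go_join (sep : List Char) (hsep : sep ≠ []) :
    ∀ fuel l cur acc, l.length ≤ fuel →
      List.intercalate sep (PySem.Chars.splitOn.go sep fuel l cur acc)
        = (if acc = [] then [] else List.intercalate sep acc.reverse ++ sep) ++ cur.reverse ++ l := by
  intro fuel
  induction fuel with
  | zero =>
    intro l cur acc hl
    have hnil : l = [] := by cases l <;> simp_all
    subst hnil
    unfold PySem.Chars.splitOn.go
    simp only [List.append_nil, List.reverse_cons]
    rw [pv_intercalate_snoc sep acc.reverse cur.reverse]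
    simp
  | succ n ih =>
    intro l cur acc hl
    cases l with
    | nil =>
      unfold PySem.Chars.splitOn.go
      simp only [List.append_nil, List.reverse_cons]
      rw [pv_intercalate_snoc sep acc.reverse cur.reverse]
      simp
    | cons c rest =>
      unfold PySem.Chars.splitOn.go
      by_cases hpre : sep.isPrefixOf (c :: rest) = true
      · simp only [hpre, if_true]
        have hp : sep <+: (c :: rest) := List.isPrefixOf_iff_prefix.mp hpre
        obtain ⟨tl, htl⟩ := hp
        have hslen : 1 ≤ sep.length := by
          cases sep <;> simp_all
        have hdrop : (c :: rest).drop sep.length = tl := by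
          rw [← htl, List.drop_left' rfl]
        have hlen : ((c :: rest).drop sep.length).length ≤ n := by
          rw [hdrop]
          have h2 : sep.length + tl.length = (c :: rest).length := by
            rw [← htl]; simp
          simp only [List.length_cons] at h2 hl
          omega
        rw [ih _ _ _ hlen]
        simp only [List.reverse_cons]
        rw [pv_intercalate_snoc sep acc.reverse cur.reverse]
        rw [hdrop, ← htl]
        by_cases hacc : acc = [] <;> simp [hacc]
      · simp only [hpre, if_false, Bool.false_eq_true]
        rw [ih _ _ _ (by simpa using hl)]
        simp

theorem pv_join_splitOn (sep : List Char) (hsep : sep ≠ []) (s : List Char) :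
    List.intercalate sep (PySem.Chars.splitOn s sep) = s := by
  unfold PySem.Chars.splitOn
  rw [pv_go_join sep hsep _ _ _ _ (by omega)]
  simp

theorem pv_go_ne_nil (sep : List Char) :
    ∀ fuel l cur acc, PySem.Chars.splitOn.go sep fuel l cur acc ≠ [] := by
  intro fuel
  induction fuel with
  | zero => intro l cur acc; unfold PySem.Chars.splitOn.go; simp
  | succ n ih =>
    intro l cur acc
    cases l with
    | nil => unfold PySem.Chars.splitOn.go; simp
    | cons c rest =>
      unfold PySem.Chars.splitOn.go
      by_cases hpre : sep.isPrefixOf (c :: rest) = true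
      · simp only [hpre, if_true]; exact ih _ _ _
      · simp only [hpre, if_false, Bool.false_eq_true]; exact ih _ _ _

theorem pv_splitOn_ne_nil (sep s : List Char) : PySem.Chars.splitOn s sep ≠ [] :=
  pv_go_ne_nil sep _ s [] []

-- "\n".join on a nonempty tail
theorem pv_intercalate_cons (sep x : List Char) (t : List (List Char)) (h : t ≠ []) :
    List.intercalate sep (x :: t) = x ++ sep ++ List.intercalate sep t := by
  cases t with
  | nil => simp at h
  | cons b u => cases u <;> simp [List.intercalate, List.intersperse]

-- A's split / insert-header / join round trip equals prefixing header ++ "\n"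
theorem pv_header_round (hdr s : String) :
    PySem.Str.join "\n" (hdr :: (PySem.Str.split? s "\n").getD [])
      = hdr ++ "\n" ++ s := by
  have hsep : ("\n".toList : List Char) ≠ [] := by decide
  rw [PySem.Str.split?]
  rw [show PySem.Chars.split? s.toList "\n".toList
        = some (PySem.Chars.splitOn s.toList "\n".toList) from by
      simp [PySem.Chars.split?]]
  simp only [Option.map_some, Option.getD_some]
  have hne : (PySem.Chars.splitOn s.toList "\n".toList).map String.ofList ≠ [] := by
    simp [pv_splitOn_ne_nil]
  rw [PySem.Str.join]
  rw [show (hdr :: (PySem.Chars.splitOn s.toList "\n".toList).map String.ofList).map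
        String.toList
      = hdr.toList :: ((PySem.Chars.splitOn s.toList "\n".toList).map String.ofList).map
          String.toList from by simp]
  rw [PySem.Chars.join,
      pv_intercalate_cons _ _ _ (by simpa using hne)]
  rw [show ((PySem.Chars.splitOn s.toList "\n".toList).map String.ofList).map String.toList
        = PySem.Chars.splitOn s.toList "\n".toList from by
      simp [List.map_map, Function.comp_def]]
  rw [pv_join_splitOn _ hsep]
  simp only [String.append_assoc]
  simp only [String.ofList_append, String.ofList_toList]
  rw [String.append_assoc]

-- the final branch: A's strip test + header splice = B's direct assembly
theorem pv_final (P : List String) (hP : ∀ x ∈ P, 'M' ∈ x.toList) :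
    (if PySem.Str.strip (PySem.Str.join "" P) ≠ "" then
        PySem.Str.join "\n" ("- Suspicious LOLBAS detections (T1059):" ::
          (PySem.Str.split? (PySem.Str.join "" P) "\n").getD [])
      else PySem.Str.join "" P)
      = (if P = [] then "" else
          "- Suspicious LOLBAS detections (T1059):\n" ++ PySem.Str.join "" P) := by
  by_cases hp : P = []
  · subst hp
    simp [PySem.Str.join, PySem.Chars.join, List.intercalate, PySem.Str.strip,
      PySem.Chars.strip, PySem.Chars.rstrip, PySem.Chars.lstrip]
  · have hM : 'M' ∈ (PySem.Str.join "" P).toList := by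
      cases P with
      | nil => exact absurd rfl hp
      | cons x t =>
        have hx : 'M' ∈ x.toList := hP x (by simp)
        rw [PySem.Str.toList_join, PySem.Chars.join]
        rw [show ("".toList : List Char) = [] from rfl, pv_intercalate_nil]
        exact List.mem_flatten.mpr ⟨x.toList, by simp, hx⟩
    have hstrip := pv_strip_ne _ hM
    rw [if_pos hstrip, if_neg hp, pv_header_round]
    rw [show ("- Suspicious LOLBAS detections (T1059):\n" : String)
        = "- Suspicious LOLBAS detections (T1059):" ++ "\n" from rfl, String.append_assoc]

theorem pv_getD_empty (p : String) : (PySem.Dict.empty : PySem.Dict String (List String)).getD p [] = [] := rfl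

theorem pv_outer_fold0 (ent : String → String → String) (pidsOf : String → List String)
    (procs : List String) :
    procs.foldl (fun s p => (pidsOf p).foldl (fun s pid => s ++ ent p pid) s) ""
      = PySem.Str.join ""
          (procs.foldl (fun ps p => (pidsOf p).foldl (fun ps pid => ps ++ [ent p pid]) ps) []) :=
  pv_outer_fold ent pidsOf procs []

theorem pv_main (d : List (String × List String)) :
    DetectLOLBAS d = DetectLOLBAS_alt d := by
  unfold DetectLOLBAS DetectLOLBAS_alt count_occurrences
  dsimp only
  simp only [pv_entry_eq, pv_pids_fold, pv_group_fold, pv_getD_empty, List.nil_append]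
  rw [pv_outer_fold0]
  refine pv_final _ ?_
  refine pv_parts_mem _ ?_ _ _ [] (by simp)
  intro p pid
  simp [String.toList_append]

-- ===== VERDICT (by name: the statement is the Claim_ definition above) =====
theorem DetectLOLBAS_spec : Claim_equal_DetectLOLBAS := by
  intro d _ _
  unfold Spec_DetectLOLBAS
  exact pv_main d
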